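-- pv_equiv track=rewrite | github.com/franciscomatos/IA-P2 | proj2v0/BN.py | computeEvids
-- ===== SOURCE A (Python) =====
-- import itertools as it
--
-- def computeEvids(evid, x, y, val):
--     evidsList = []
--
--     # list of all possible combinations of the unknown variables
--     l = list(it.product([0,1], repeat=len(y)))
--
--     for possibility in l:
--         aux = list(evid)
--         aux[x[0]] = val # changes the posterior variable
--         for i in range(len(y)): # changes the unknown variables
--             aux[y[i]] = possibility[i]
--         evidsList.append(aux)
--
--
--     return evidsList
-- ===== SOURCE B (Python) =====
-- def computeEvids(evid, x, y, val):
--     # Repeated doubling: start from the single base row (evid with the posterior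
--     # variable set), then each unknown index splits every row into a 0-copy and a
--     # 1-copy; after all of y the rows are in the same lexicographic order.
--     base = list(evid)
--     base[x[0]] = val
--     rows = [base]
--     for j in y:
--         expanded = []
--         for r in rows:
--             for b in (0, 1):
--                 a = list(r)
--                 a[j] = b
--                 expanded.append(a)
--         rows = expanded
--     return rows
-- ===== Notes on version B (the rewrite author's own statement) =====
-- stated objective: alternative
-- what changed: Replaces the materialised itertools.product table plus per-possibility index loop by repeated doubling: a single fold over y that splits each accumulated row into its 0- and 1-copy, so no bit tuple is ever built or decoded.
import Mathlib
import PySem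

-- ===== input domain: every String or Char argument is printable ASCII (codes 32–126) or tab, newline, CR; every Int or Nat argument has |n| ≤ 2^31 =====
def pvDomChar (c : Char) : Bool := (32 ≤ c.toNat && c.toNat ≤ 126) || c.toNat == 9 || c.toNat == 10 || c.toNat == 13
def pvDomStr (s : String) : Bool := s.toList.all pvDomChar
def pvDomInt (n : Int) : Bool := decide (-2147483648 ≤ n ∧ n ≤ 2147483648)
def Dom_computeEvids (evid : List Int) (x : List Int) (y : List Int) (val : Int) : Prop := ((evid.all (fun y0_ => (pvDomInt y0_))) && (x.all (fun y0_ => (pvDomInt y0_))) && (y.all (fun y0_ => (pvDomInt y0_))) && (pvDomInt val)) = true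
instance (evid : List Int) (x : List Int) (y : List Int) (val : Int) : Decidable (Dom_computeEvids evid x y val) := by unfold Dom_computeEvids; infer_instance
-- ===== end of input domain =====

-- B replaces the itertools.product table + per-possibility index loop by a repeated-doubling fold over y (alternative decomposition, same order).

-- ===== PORT A =====
-- itertools.product([0,1], repeat=n), lexicographic (last position varies fastest)
def pvProd : Nat → List (List Int)
  | 0 => [[]]
  | n + 1 => ([0, 1] : List Int).flatMap (fun b => (pvProd n).map (fun rest => b :: rest))

def computeEvids (evid : List Int) (x : List Int) (y : List Int) (val : Int) : List (List Int) :=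
  (pvProd y.length).map (fun possibility =>
    (List.range y.length).foldl
      (fun aux (i : Nat) =>
        PySem.List.pySetD aux (PySem.List.pyGetD y (i : Int) 0) (PySem.List.pyGetD possibility (i : Int) 0))
      (PySem.List.pySetD evid (PySem.List.pyGetD x 0 0) val))

-- ===== PORT B =====
-- 'for r in rows: for b in (0,1): append copy with r[j]=b'
def pvExpand (rows : List (List Int)) (j : Int) : List (List Int) :=
  rows.flatMap (fun r => [PySem.List.pySetD r j 0, PySem.List.pySetD r j 1])

def computeEvids_alt (evid : List Int) (x : List Int) (y : List Int) (val : Int) : List (List Int) :=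
  y.foldl pvExpand [PySem.List.pySetD evid (PySem.List.pyGetD x 0 0) val]

-- ===== PRECONDITION & SPEC =====
-- Pre_ excludes exactly the inputs where A raises: x empty (x[0] IndexError) or an index x[0] / some element of y outside Python range for evid.
def Pre_computeEvids (evid : List Int) (x : List Int) (y : List Int) (val : Int) : Prop :=
  x ≠ [] ∧ PySem.Raise.InRange evid.length (x.headD 0) ∧ ∀ i ∈ y, PySem.Raise.InRange evid.length i
instance (evid : List Int) (x : List Int) (y : List Int) (val : Int) : Decidable (Pre_computeEvids evid x y val) := by unfold Pre_computeEvids; infer_instance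

def pvWitness_computeEvids : List Int × List Int × List Int × Int := ([0, 0], [0], [1], 1)

def Spec_computeEvids (evid : List Int) (x : List Int) (y : List Int) (val : Int) (out : List (List Int)) : Prop := out = computeEvids_alt evid x y val
instance (evid : List Int) (x : List Int) (y : List Int) (val : Int) (out : List (List Int)) : Decidable (Spec_computeEvids evid x y val out) := by unfold Spec_computeEvids; infer_instance

-- ===== CLAIM (what is proved, stated in full; the proofs are below) =====
def Claim_equal_computeEvids : Prop := ∀ (evid : List Int) (x : List Int) (y : List Int) (val : Int), Dom_computeEvids evid x y val → Pre_computeEvids evid x y val → Spec_computeEvids evid x y val (computeEvids evid x y val)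

-- ===== LEMMAS AND PROOFS =====

-- A's inner index loop, rephrased over the zipped (index, value) pairs
def pvApplyZip (ys p : List Int) (base : List Int) : List Int :=
  (ys.zip p).foldl (fun a jv => PySem.List.pySetD a jv.1 jv.2) base

lemma pvProd_length {n : Nat} {p : List Int} (hp : p ∈ pvProd n) : p.length = n := by
  induction n generalizing p with
  | zero => simp [pvProd] at hp; simp [hp]
  | succ n ih =>
    simp only [pvProd, List.mem_flatMap, List.mem_map] at hp
    obtain ⟨b, _, rest, hrest, rfl⟩ := hp
    simp [ih hrest]

lemma pvInner_eq_applyZip (ys p base : List Int) (hp : p.length = ys.length) :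
    (List.range ys.length).foldl
      (fun aux (i : Nat) =>
        PySem.List.pySetD aux (PySem.List.pyGetD ys (i : Int) 0) (PySem.List.pyGetD p (i : Int) 0))
      base = pvApplyZip ys p base := by
  induction ys generalizing p base with
  | nil => simp [pvApplyZip]
  | cons j ys ih =>
    cases p with
    | nil => simp at hp
    | cons v p =>
      simp only [List.length_cons] at hp ⊢
      rw [List.range_succ_eq_map, List.foldl_cons, List.foldl_map]
      have h0 : PySem.List.pySetD base (PySem.List.pyGetD (j :: ys) ((0 : Nat) : Int) 0)
          (PySem.List.pyGetD (v :: p) ((0 : Nat) : Int) 0) = PySem.List.pySetD base j v := by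
        simp [PySem.List.pyGetD, PySem.List.pyGet?, PySem.List.pyIdx?]
      rw [h0]
      have hstep : (List.range ys.length).foldl
            (fun aux (i : Nat) =>
              PySem.List.pySetD aux (PySem.List.pyGetD (j :: ys) ((i.succ : Nat) : Int) 0)
                (PySem.List.pyGetD (v :: p) ((i.succ : Nat) : Int) 0))
            (PySem.List.pySetD base j v)
          = (List.range ys.length).foldl
              (fun aux (i : Nat) =>
                PySem.List.pySetD aux (PySem.List.pyGetD ys (i : Int) 0)
                  (PySem.List.pyGetD p (i : Int) 0))
              (PySem.List.pySetD base j v) := by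
        apply PySem.List.foldl_congr_mem
        intro acc i hi
        have hiy : i < ys.length := List.mem_range.mp hi
        have hip : i < p.length := by omega
        have h1 : (0 : Int) ≤ (i : Int) + 1 := by positivity
        congr 1
        · simp [PySem.List.pyGetD, PySem.List.pyGet?, PySem.List.pyIdx?, Nat.succ_eq_add_one, hiy, h1]
        · simp [PySem.List.pyGetD, PySem.List.pyGet?, PySem.List.pyIdx?, Nat.succ_eq_add_one, hip, h1]
      rw [hstep, ih _ _ (by omega)]
      simp [pvApplyZip]

lemma pvFoldExpand_append (ys : List Int) (a b : List (List Int)) :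
    ys.foldl pvExpand (a ++ b) = ys.foldl pvExpand a ++ ys.foldl pvExpand b := by
  induction ys generalizing a b with
  | nil => rfl
  | cons j ys ih => simp only [List.foldl_cons, pvExpand, List.flatMap_append, ih]

lemma pvMain (ys : List Int) (base : List Int) :
    (pvProd ys.length).map (fun p => pvApplyZip ys p base) = ys.foldl pvExpand [base] := by
  induction ys generalizing base with
  | nil => simp [pvProd, pvApplyZip]
  | cons j ys ih =>
    simp only [List.length_cons, pvProd, List.flatMap_cons, List.flatMap_nil,
      List.append_nil, List.map_append, List.map_map, List.foldl_cons]
    have hz : ∀ (b : Int), ((pvProd ys.length).map ((fun p => pvApplyZip (j :: ys) p base) ∘ (fun rest => b :: rest)))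
        = ys.foldl pvExpand [PySem.List.pySetD base j b] := by
      intro b
      rw [← ih (PySem.List.pySetD base j b)]
      apply List.map_congr_left
      intro rest _
      simp [pvApplyZip]
    have hexp : pvExpand [base] j = [PySem.List.pySetD base j 0] ++ [PySem.List.pySetD base j 1] := by
      simp [pvExpand]
    rw [hz 0, hz 1, hexp, pvFoldExpand_append]

-- ===== VERDICT (by name: the statement is the Claim_ definition above) =====
theorem computeEvids_spec : Claim_equal_computeEvids := by
  intro evid x y val _ _
  unfold Spec_computeEvids computeEvids computeEvids_alt
  rw [← pvMain]
  apply List.map_congr_left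
  intro p hp
  exact pvInner_eq_applyZip y p _ (pvProd_length hp)
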